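-- pv_equiv track=rewrite | github.com/Nathanesteve/ComparaisonDistanceMot | main.py | coefficient_mat_jaro_winkler
-- ===== SOURCE A (Python) =====
-- def correpondance_jaro_winkler(mot1, mot2, lettre, position):
--
--     '''
--
--     Fonction qui determine si une lettre est correpondante
--
--     '''
--
--     taille1 = len(mot1)
--     taille2 = len(mot2)
--
--     c = round((max(abs(taille1), abs(taille2))/2) - 1)
--
--     selection = mot2[max(0, position - c): c+position]
--
--     liste_lettre_correpondantes = []
--     for i in selection:
--         liste_lettre_correpondantes.append(i)
--
--     correspondance = (lettre in liste_lettre_correpondantes)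
--
--     return correspondance
--
-- def coefficient_mat_jaro_winkler(mot1, mot2):
--
--     '''
--
--     Donne le parametre c et la liste des lettres identiques
--     et correspondantes de deux mots
--
--     '''
--
--     if len(mot1) != len(mot2):
--         jaro1 = max(mot1, mot2, key=len)
--         jaro2 = min(mot1, mot2, key=len)
--     elif len(mot1) == len(mot2):
--         jaro1 = mot1
--         jaro2 = mot2
--
--     count_coef_jaro_winkler = 0
--     lst_correspondance = []
--
--     for i in range(0, len(jaro1)):
--         if correpondance_jaro_winkler(jaro1, jaro2, jaro1[i], i):
--             count_coef_jaro_winkler = count_coef_jaro_winkler + 1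
--             lst_correspondance.append(jaro1[i])
--
--     return count_coef_jaro_winkler, lst_correspondance
-- ===== SOURCE B (Python) =====
-- def _window_hit(ps, lo, hi):
--     # ps is ascending; report whether some p in [lo, hi) occurs, stopping early
--     for p in ps:
--         if p >= hi:
--             return False
--         if p >= lo:
--             return True
--     return False
--
-- def coefficient_mat_jaro_winkler(mot1, mot2):
--     if len(mot1) < len(mot2):
--         jaro1, jaro2 = mot2, mot1
--     else:
--         jaro1, jaro2 = mot1, mot2
--     n = len(jaro1)
--     c = round(n / 2 - 1)
--     positions = {}
--     for p, ch in enumerate(jaro2):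
--         positions.setdefault(ch, []).append(p)
--     count = 0
--     letters = []
--     for i, ch in enumerate(jaro1):
--         if _window_hit(positions.get(ch, []), i - c, i + c):
--             count += 1
--             letters.append(ch)
--     return count, letters
-- ===== Notes on version B (the rewrite author's own statement) =====
-- stated objective: faster
-- what changed: B builds a letter->positions index of the shorter word once and tests each window by an early-exit scan of that letter's (typically tiny) ascending position list, instead of A's per-index slicing and copying of an O(n)-wide window.
import Mathlib
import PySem

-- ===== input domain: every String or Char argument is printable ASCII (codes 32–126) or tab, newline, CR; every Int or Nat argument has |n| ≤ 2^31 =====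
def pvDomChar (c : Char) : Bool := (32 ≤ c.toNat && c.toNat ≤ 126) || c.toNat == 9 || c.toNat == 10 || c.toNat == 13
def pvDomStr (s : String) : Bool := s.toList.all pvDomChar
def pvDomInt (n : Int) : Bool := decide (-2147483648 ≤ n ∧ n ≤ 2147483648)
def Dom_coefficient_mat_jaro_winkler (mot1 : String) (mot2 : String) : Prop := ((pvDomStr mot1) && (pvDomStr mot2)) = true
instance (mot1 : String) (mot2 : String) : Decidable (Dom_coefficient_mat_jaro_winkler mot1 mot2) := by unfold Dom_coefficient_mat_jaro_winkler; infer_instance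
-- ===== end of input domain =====

-- B replaces A's per-index window slice-and-copy by a letter->positions index with an early-exit scan (faster by a large constant on typical text; equal return value proved below).

-- ===== PORT A =====
-- round((L/2) - 1) for an integer L >= 0: the argument is an exact half-integer, so Python's
-- banker's rounding is reproduced exactly (ties go to the even integer). Used by both ports (both Pythons call round).
def pvRoundHalfPred (L : Int) : Int :=
  if L % 2 = 0 then L / 2 - 1
  else if ((L - 1) / 2) % 2 = 0 then (L - 1) / 2 else (L - 1) / 2 - 1

def correpondance_jaro_winkler (mot1 : List Char) (mot2 : List Char) (lettre : Char) (position : Int) : Bool :=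
  let taille1 : Int := mot1.length
  let taille2 : Int := mot2.length
  let c : Int := pvRoundHalfPred (max |taille1| |taille2|)
  let selection := PySem.List.slice mot2 (some (max 0 (position - c))) (some (c + position))
  let liste_lettre_correpondantes := selection.foldl (fun acc i => acc ++ [i]) []
  liste_lettre_correpondantes.contains lettre

def coefficient_mat_jaro_winkler (mot1 : String) (mot2 : String) : Int × List String :=
  let l1 := mot1.toList
  let l2 := mot2.toList
  -- max/min(mot1, mot2, key=len): the first argument wins a tie (only the len1 ≠ len2 branch reaches them)
  let jaro1 := if l1.length ≠ l2.length then (if l2.length > l1.length then l2 else l1) else l1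
  let jaro2 := if l1.length ≠ l2.length then (if l2.length < l1.length then l2 else l1) else l2
  (PySem.List.pyRange 0 (jaro1.length : Int) 1).foldl
    (fun st i =>
      if correpondance_jaro_winkler jaro1 jaro2 (PySem.List.pyGetD jaro1 i ' ') i then
        (st.1 + 1, st.2 ++ [String.mk [PySem.List.pyGetD jaro1 i ' ']])
      else st)
    (0, [])

-- ===== PORT B =====
def pvWindowHit (ps : List Int) (lo hi : Int) : Bool :=
  match ps with
  | [] => false
  | p :: r => if p ≥ hi then false else if p ≥ lo then true else pvWindowHit r lo hi

def coefficient_mat_jaro_winkler_alt (mot1 : String) (mot2 : String) : Int × List String :=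
  let l1 := mot1.toList
  let l2 := mot2.toList
  let jaro1 := if l1.length < l2.length then l2 else l1
  let jaro2 := if l1.length < l2.length then l1 else l2
  let c := pvRoundHalfPred (jaro1.length : Int)      -- round(n/2 - 1)
  -- positions.setdefault(ch, []).append(p)  ==  positions[ch] = positions.get(ch, []) + [p]
  let positions : PySem.Dict Char (List Int) :=
    (PySem.List.enumerate jaro2 0).foldl (fun d q => d.modify q.2 [] (· ++ [q.1])) PySem.Dict.empty
  (PySem.List.enumerate jaro1 0).foldl
    (fun st q =>
      if pvWindowHit (positions.getD q.2 []) (q.1 - c) (q.1 + c) then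
        (st.1 + 1, st.2 ++ [String.mk [q.2]])
      else st)
    (0, [])

-- ===== PRECONDITION & SPEC =====
def Spec_coefficient_mat_jaro_winkler (mot1 : String) (mot2 : String) (out : Int × List String) : Prop := out = coefficient_mat_jaro_winkler_alt mot1 mot2
instance (mot1 : String) (mot2 : String) (out : Int × List String) : Decidable (Spec_coefficient_mat_jaro_winkler mot1 mot2 out) := by unfold Spec_coefficient_mat_jaro_winkler; infer_instance

-- ===== CLAIM (what is proved, stated in full; the proofs are below) =====
def Claim_equal_coefficient_mat_jaro_winkler : Prop := ∀ (mot1 : String) (mot2 : String), Dom_coefficient_mat_jaro_winkler mot1 mot2 → Spec_coefficient_mat_jaro_winkler mot1 mot2 (coefficient_mat_jaro_winkler mot1 mot2)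

-- ===== LEMMAS AND PROOFS =====

-- the per-letter position list B's dict lookup returns
def pvPosList (l2 : List Char) (ch : Char) : List Int :=
  ((PySem.List.enumerate l2 0).filter (fun q => q.2 == ch)).map (·.1)

lemma pvPositions_getD (l2 : List Char) (ch : Char) :
    ((PySem.List.enumerate l2 0).foldl (fun d q => d.modify q.2 [] (· ++ [q.1]))
      (PySem.Dict.empty : PySem.Dict Char (List Int))).getD ch [] = pvPosList l2 ch := by
  have h1 : ((PySem.List.enumerate l2 0).foldl (fun d q => d.modify q.2 [] (· ++ [q.1]))
      (PySem.Dict.empty : PySem.Dict Char (List Int)))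
      = (((PySem.List.enumerate l2 0).map Prod.swap).foldl (fun d p => d.modify p.1 [] (· ++ [p.2]))
      (PySem.Dict.empty : PySem.Dict Char (List Int))) := by
    rw [List.foldl_map]
    rfl
  rw [h1, PySem.Dict.getD_foldl_modify_append]
  simp [pvPosList, List.filter_map, List.map_map, Function.comp_def, Prod.swap]

lemma pvPosList_sorted (l2 : List Char) (ch : Char) : (pvPosList l2 ch).Pairwise (· < ·) := by
  unfold pvPosList
  refine List.Pairwise.map _ (fun a b h => h) ?_
  exact List.Pairwise.filter _ (PySem.List.pairwise_lt_enumerate l2 0)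

lemma mem_pvPosList (l2 : List Char) (ch : Char) (x : Int) :
    x ∈ pvPosList l2 ch ↔ ∃ k : Nat, l2[k]? = some ch ∧ x = (k : Int) := by
  unfold pvPosList
  simp only [List.mem_map, List.mem_filter, PySem.List.mem_enumerate_iff]
  constructor
  · rintro ⟨⟨i, c⟩, ⟨⟨k, hk, heq⟩, hc⟩, hx⟩
    obtain ⟨h1, h2⟩ := Prod.mk.injEq .. ▸ heq
    refine ⟨k, ?_, by simp_all⟩
    simp only [List.getElem?_eq_getElem hk]
    simp_all
  · rintro ⟨k, hk, hx⟩
    have hlt : k < l2.length := by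
      by_contra h
      rw [List.getElem?_eq_none (by omega)] at hk
      simp at hk
    refine ⟨((k : Int), ch), ⟨⟨k, hlt, by
      rw [List.getElem?_eq_getElem hlt] at hk
      simp at hk
      simp [hk]⟩, by simp⟩, hx.symm⟩

lemma pvWindowHit_iff (ps : List Int) (lo hi : Int) (hs : ps.Pairwise (· < ·)) :
    pvWindowHit ps lo hi = true ↔ ∃ p ∈ ps, lo ≤ p ∧ p < hi := by
  induction ps with
  | nil => simp [pvWindowHit]
  | cons p r ih =>
    rw [List.pairwise_cons] at hs
    unfold pvWindowHit
    split_ifs with h1 h2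
    · simp only [false_iff]
      rintro ⟨q, hq, hlo, hhi⟩
      rcases List.mem_cons.mp hq with rfl | hq
      · omega
      · have := hs.1 q hq; omega
    · simp only [true_iff]
      exact ⟨p, List.mem_cons_self .., by omega⟩
    · rw [ih hs.2]
      constructor
      · rintro ⟨q, hq, hc⟩; exact ⟨q, List.mem_cons_of_mem _ hq, hc⟩
      · rintro ⟨q, hq, hc⟩
        rcases List.mem_cons.mp hq with rfl | hq
        · omega
        · exact ⟨q, hq, hc⟩

lemma mem_slice_iff (l : List Char) (ch : Char) (a b : Int) (ha : 0 ≤ a) (hb : 0 ≤ b) :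
    ch ∈ PySem.List.slice l (some a) (some b) ↔
      ∃ k : Nat, l[k]? = some ch ∧ a ≤ (k : Int) ∧ (k : Int) < b := by
  rw [PySem.List.slice_toNat l ha hb, List.mem_iff_getElem?]
  constructor
  · rintro ⟨j, hj⟩
    rw [List.getElem?_take] at hj
    split at hj
    · rw [List.getElem?_drop] at hj
      refine ⟨a.toNat + j, hj, by omega, ?_⟩
      have hjlt : j < b.toNat - a.toNat := by assumption
      omega
    · exact absurd hj (by simp)
  · rintro ⟨k, hk, hak, hkb⟩
    refine ⟨k - a.toNat, ?_⟩
    rw [List.getElem?_take, if_pos (by omega), List.getElem?_drop]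
    rw [show a.toNat + (k - a.toNat) = k by omega]
    exact hk

lemma pvRoundHalfPred_nonneg (L : Int) (h : 1 ≤ L) : 0 ≤ pvRoundHalfPred L := by
  unfold pvRoundHalfPred; split_ifs <;> omega

lemma cond_eq (j1 j2 : List Char) (h : j2.length ≤ j1.length) (ch : Char) (i : Int)
    (hi0 : 0 ≤ i) (hin : i < (j1.length : Int)) :
    correpondance_jaro_winkler j1 j2 ch i =
      pvWindowHit (pvPosList j2 ch) (i - pvRoundHalfPred (j1.length : Int)) (i + pvRoundHalfPred (j1.length : Int)) := by
  have hC : 0 ≤ pvRoundHalfPred (j1.length : Int) := pvRoundHalfPred_nonneg _ (by omega)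
  unfold correpondance_jaro_winkler
  have hmax : max |((j1.length : Nat) : Int)| |((j2.length : Nat) : Int)| = ((j1.length : Nat) : Int) := by
    rw [Int.abs_natCast, Int.abs_natCast]; omega
  simp only [hmax, PySem.List.foldl_append_singleton]
  rw [Bool.eq_iff_iff]
  rw [List.contains_iff_mem, List.nil_append]
  rw [mem_slice_iff _ _ _ _ (le_max_left _ _) (by omega)]
  rw [pvWindowHit_iff _ _ _ (pvPosList_sorted j2 ch)]
  simp only [mem_pvPosList]
  constructor
  · rintro ⟨k, hk, h1, h2⟩
    exact ⟨(k : Int), ⟨k, hk, rfl⟩, by omega, by omega⟩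
  · rintro ⟨p, ⟨k, hk, rfl⟩, hlo, hhi⟩
    exact ⟨k, hk, by omega, by omega⟩

lemma key_loops (j1 j2 : List Char) (h : j2.length ≤ j1.length) :
    (PySem.List.pyRange 0 (j1.length : Int) 1).foldl
      (fun (st : Int × List String) i =>
        if correpondance_jaro_winkler j1 j2 (PySem.List.pyGetD j1 i ' ') i then
          (st.1 + 1, st.2 ++ [String.mk [PySem.List.pyGetD j1 i ' ']])
        else st) (0, []) =
    (PySem.List.enumerate j1 0).foldl
      (fun (st : Int × List String) q =>
        if pvWindowHit ((((PySem.List.enumerate j2 0).foldl (fun d q => d.modify q.2 [] (· ++ [q.1]))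
              (PySem.Dict.empty : PySem.Dict Char (List Int)))).getD q.2 [])
            (q.1 - pvRoundHalfPred (j1.length : Int)) (q.1 + pvRoundHalfPred (j1.length : Int)) then
          (st.1 + 1, st.2 ++ [String.mk [q.2]])
        else st) (0, []) := by
  simp only [pvPositions_getD]
  rw [PySem.List.enumerate_eq_map_pyRange j1 ' ', List.foldl_map]
  have hlen : PySem.List.len j1 = (j1.length : Int) := rfl
  rw [hlen]
  apply PySem.List.foldl_congr_mem
  intro st i hi
  rw [PySem.List.mem_pyRange_one] at hi
  rw [cond_eq j1 j2 h _ i hi.1 hi.2]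

-- ===== VERDICT (by name: the statement is the Claim_ definition above) =====
theorem coefficient_mat_jaro_winkler_spec : Claim_equal_coefficient_mat_jaro_winkler := by
  intro mot1 mot2 _
  unfold Spec_coefficient_mat_jaro_winkler
  simp only [coefficient_mat_jaro_winkler, coefficient_mat_jaro_winkler_alt]
  split_ifs <;> first
    | omega
    | exact key_loops _ _ (by omega)
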